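-- pv_equiv track=rewrite | github.com/AngheloAlf/Programacion-CIAC-2019 | intensivos S2/Fase 1/05/Code/juegos.py | conocidos
-- ===== SOURCE A (Python) =====
-- def conocidos(jugador,juegos):
--     amigos=[]
--     for _,(_,_,lista) in juegos.items():
--         if jugador in lista:
--             for amigo in lista:
--                 if amigo!=jugador and amigo not in amigos:
--                     amigos.append(amigo)
--     return amigos
-- ===== SOURCE B (Python) =====
-- def conocidos(jugador, juegos):
--     # One flat comprehension over the qualifying games' player lists (jugador dropped),
--     # then a positional dedup: keep x exactly at its first occurrence in the input
--     # (flat.index(x) == i) -- no accumulator, no set/dict is maintained.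
--     flat = [a for (_, _, lista) in juegos.values() if jugador in lista
--               for a in lista if a != jugador]
--     return [x for i, x in enumerate(flat) if flat.index(x) == i]
-- ===== Notes on version B (the rewrite author's own statement) =====
-- stated objective: alternative
-- what changed: A's single interleaved loop that grows an 'amigos' accumulator and tests membership in it is replaced by a flat comprehension over the qualifying games plus a positional dedup that keeps an element iff its first index in the flattened input equals its own position (flat.index(x) == i) -- no accumulator or set is maintained.
import Mathlib
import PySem

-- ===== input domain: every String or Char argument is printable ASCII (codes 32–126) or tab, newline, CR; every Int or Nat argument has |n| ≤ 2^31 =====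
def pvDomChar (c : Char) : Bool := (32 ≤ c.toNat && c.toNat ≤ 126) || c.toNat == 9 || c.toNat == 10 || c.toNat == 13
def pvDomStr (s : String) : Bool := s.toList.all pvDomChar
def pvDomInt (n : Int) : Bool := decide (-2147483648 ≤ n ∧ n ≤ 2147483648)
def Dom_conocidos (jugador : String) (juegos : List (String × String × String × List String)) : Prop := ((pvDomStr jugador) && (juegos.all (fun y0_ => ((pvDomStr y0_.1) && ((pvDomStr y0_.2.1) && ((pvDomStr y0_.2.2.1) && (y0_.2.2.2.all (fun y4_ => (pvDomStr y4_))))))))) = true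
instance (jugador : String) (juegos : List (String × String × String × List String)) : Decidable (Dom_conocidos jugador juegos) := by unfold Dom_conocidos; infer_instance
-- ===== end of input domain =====

-- B drops A's accumulator-with-membership loop: it flattens the qualifying games'
-- lists (jugador removed) and dedups positionally, keeping x iff its first index in
-- the flattened input equals its own position (alternative decomposition, same cost).

-- ===== PORT A =====
def conocidos (jugador : String) (juegos : List (String × String × String × List String)) : List String :=
  juegos.foldl (fun amigos kv =>
    if jugador ∈ kv.2.2.2 then
      kv.2.2.2.foldl (fun am amigo =>
        if amigo ≠ jugador ∧ amigo ∉ am then am ++ [amigo] else am) amigos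
    else amigos) []

-- ===== PORT B =====
def conocidos_alt (jugador : String) (juegos : List (String × String × String × List String)) : List String :=
  let flat := juegos.flatMap (fun kv =>
    if jugador ∈ kv.2.2.2 then kv.2.2.2.filter (fun a => decide (a ≠ jugador)) else [])
  ((PySem.List.enumerate flat 0).filter
      (fun p => (PySem.List.index? flat p.2).map (fun n => (n : Int)) == some p.1)).map (·.2)

-- ===== PRECONDITION & SPEC =====
def Spec_conocidos (jugador : String) (juegos : List (String × String × String × List String)) (out : List String) : Prop := out = conocidos_alt jugador juegos
instance (jugador : String) (juegos : List (String × String × String × List String)) (out : List String) : Decidable (Spec_conocidos jugador juegos out) := by unfold Spec_conocidos; infer_instance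

-- ===== CLAIM (what is proved, stated in full; the proofs are below) =====
def Claim_equal_conocidos : Prop := ∀ (jugador : String) (juegos : List (String × String × String × List String)), Dom_conocidos jugador juegos → Spec_conocidos jugador juegos (conocidos jugador juegos)

-- ===== LEMMAS AND PROOFS =====

-- A's outer loop is the fold of its inner step over the concatenation of the qualifying lists.
theorem conocidos_foldl_flatten (jugador : String)
    (juegos : List (String × String × String × List String)) (acc : List String) :
    juegos.foldl (fun amigos kv =>
      if jugador ∈ kv.2.2.2 then
        kv.2.2.2.foldl (fun am amigo =>
          if amigo ≠ jugador ∧ amigo ∉ am then am ++ [amigo] else am) amigos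
      else amigos) acc
    = ((juegos.filter (fun kv => decide (jugador ∈ kv.2.2.2))).flatMap (fun kv => kv.2.2.2)).foldl
        (fun am amigo => if amigo ≠ jugador ∧ amigo ∉ am then am ++ [amigo] else am) acc := by
  induction juegos generalizing acc with
  | nil => rfl
  | cons kv rest ih =>
    by_cases h : jugador ∈ kv.2.2.2 <;>
      simp [h, List.foldl_append, ih]

-- A's inner step on the non-filtered list is Set.add on the jugador-filtered list.
theorem foldl_ins_eq_foldl_add (jugador : String) (l : List String) (acc : List String) :
    l.foldl (fun am amigo => if amigo ≠ jugador ∧ amigo ∉ am then am ++ [amigo] else am) acc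
    = (l.filter (fun a => decide (a ≠ jugador))).foldl PySem.Set.add acc := by
  induction l generalizing acc with
  | nil => rfl
  | cons a rest ih =>
    by_cases ha : a = jugador
    · simp [ha, ih]
    · by_cases hm : a ∈ acc <;>
        simp [ha, hm, ih]

-- B's flatten comprehension equals filter-then-flatten-then-filter.
theorem flat_shapes (jugador : String)
    (juegos : List (String × String × String × List String)) :
    juegos.flatMap (fun kv =>
      if jugador ∈ kv.2.2.2 then kv.2.2.2.filter (fun a => decide (a ≠ jugador)) else [])
    = ((juegos.filter (fun kv => decide (jugador ∈ kv.2.2.2))).flatMap (fun kv => kv.2.2.2)).filter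
        (fun a => decide (a ≠ jugador)) := by
  induction juegos with
  | nil => rfl
  | cons kv rest ih =>
    by_cases h : jugador ∈ kv.2.2.2 <;> simp [h] <;> simpa using ih

-- Positional dedup (keep x iff its first index equals its position) is set(xs) in order.
theorem firstIdx_filter_eq_ofList (l : List String) :
    ((PySem.List.enumerate l 0).filter
        (fun p => (PySem.List.index? l p.2).map (fun n => (n : Int)) == some p.1)).map (·.2)
    = PySem.Set.ofList l := by
  induction l using List.reverseRecOn with
  | nil => rfl
  | append_singleton l x ih =>
    rw [PySem.List.enumerate_append]
    have hsing : PySem.List.enumerate [x] (0 + l.length) = [((l.length : Int), x)] := by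
      simp [PySem.List.enumerate_cons, PySem.List.enumerate_nil]
    rw [hsing, List.filter_append, List.map_append]
    have hcongr :
        (PySem.List.enumerate l 0).filter
          (fun p => (PySem.List.index? (l ++ [x]) p.2).map (fun n => (n : Int)) == some p.1)
        = (PySem.List.enumerate l 0).filter
          (fun p => (PySem.List.index? l p.2).map (fun n => (n : Int)) == some p.1) := by
      apply List.filter_congr
      intro p hp
      rcases ((PySem.List.mem_enumerate_iff _ _ _).1 hp) with ⟨k, hk, rfl⟩
      have hmem : l[k] ∈ l := List.getElem_mem hk
      rw [PySem.List.index?_append_of_mem _ hmem]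
    rw [hcongr, ih, PySem.Set.ofList_append_singleton]
    by_cases hx : x ∈ l
    · rcases Option.isSome_iff_exists.1 ((PySem.List.index?_isSome_iff _ _).2 hx) with ⟨k, hk⟩
      have hlt : k < l.length := (PySem.List.getElem_of_index?_eq_some hk).1
      have hidx : PySem.List.index? (l ++ [x]) x = some k := by
        rw [PySem.List.index?_append_of_mem _ hx, hk]
      rw [PySem.List.index?_eq_idxOf?] at hidx
      simp [hidx, PySem.Set.add, PySem.Set.contains, PySem.Set.mem_ofList, hx,
        show ¬ ((k : Int) = (l.length : Int)) by exact_mod_cast Nat.ne_of_lt hlt]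
    · have hidx : PySem.List.index? (l ++ [x]) x = some l.length :=
        PySem.List.index?_append_singleton_self l x hx
      rw [PySem.List.index?_eq_idxOf?] at hidx
      simp [hidx, PySem.Set.add, PySem.Set.contains, PySem.Set.mem_ofList, hx]

-- ===== VERDICT (by name: the statement is the Claim_ definition above) =====
theorem conocidos_spec : Claim_equal_conocidos := by
  intro jugador juegos _
  unfold Spec_conocidos conocidos conocidos_alt
  rw [conocidos_foldl_flatten, foldl_ins_eq_foldl_add, flat_shapes,
    firstIdx_filter_eq_ofList, PySem.Set.ofList_eq_foldl]
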